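-- pv_equiv track=rewrite | github.com/latacko/projects | python/alp2.py | ciongznakow
-- ===== SOURCE A (Python) =====
-- def ciongznakow(ciong, dlugosc):
--     list2 = [*ciong]
--     wys = len(list2)
--     for zna in list2:
--         for leather in ciong:
--             wys += 1
--             znak = zna +leather
--             list2.append(znak)
--             if wys >= dlugosc:
--                 return list2
-- ===== SOURCE B (Python) =====
-- import itertools
-- import functools
-- import operator
--
--
-- def ciongznakow(ciong, dlugosc):
--     elements = list(ciong)
--     result = list(elements)
--     if not elements:
--         return result
--     length = 2
--     while True:
--         for combo in itertools.product(elements, repeat=length):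
--             result.append(functools.reduce(operator.add, combo))
--             if len(result) >= dlugosc:
--                 return result
--         length += 1
-- ===== Notes on version B (the rewrite author's own statement) =====
-- stated objective: idiomatic
-- what changed: A mutates list2 while iterating over it (a self-feeding queue of growing concatenations); B generates the same stream layer by layer with itertools.product(elements, repeat=length) joined by functools.reduce, appending until the requested count is reached.
-- outside the precondition, e.g. on ciongznakow('', 5): A returns None, B returns []
import Mathlib
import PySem

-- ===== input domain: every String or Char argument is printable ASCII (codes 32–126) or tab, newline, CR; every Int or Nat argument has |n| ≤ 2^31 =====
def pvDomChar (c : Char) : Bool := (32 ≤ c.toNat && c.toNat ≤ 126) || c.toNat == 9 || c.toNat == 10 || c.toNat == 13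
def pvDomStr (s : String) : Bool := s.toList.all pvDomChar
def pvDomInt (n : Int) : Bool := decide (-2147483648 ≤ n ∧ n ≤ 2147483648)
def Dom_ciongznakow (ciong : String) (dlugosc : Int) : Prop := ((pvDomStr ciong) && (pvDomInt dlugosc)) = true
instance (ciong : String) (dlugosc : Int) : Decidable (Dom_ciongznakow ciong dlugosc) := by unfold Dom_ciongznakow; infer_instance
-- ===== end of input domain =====

-- B replaces A's self-feeding list mutation (iterating list2 while appending to it) by
-- layerwise generation with itertools.product joined by reduce; objective: idiomatic, same cost.

-- ===== PORT A =====
def strOfChar (c : Char) : String := String.mk [c]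

-- inner 'for leather in ciong' loop of A: appends zna+leather, returns early when wys >= dlugosc
def innerA (dl : Int) (zna : String) : List Char → Int → List String → (List String × Int × Bool)
  | [], wys, acc => (acc, wys, false)
  | c :: cs, wys, acc =>
    let acc' := acc ++ [zna ++ strOfChar c]
    if wys + 1 ≥ dl then (acc', wys + 1, true)
    else innerA dl zna cs (wys + 1) acc'

-- termination fact for outerA, cited in its decreasing_by
theorem innerA_false_bounds (dl : Int) (zna : String) :
    ∀ (cs : List Char) (wys : Int) (acc acc' : List String) (wys' : Int),
      cs ≠ [] → innerA dl zna cs wys acc = (acc', wys', false) →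
      wys < wys' ∧ wys' < dl := by
  intro cs
  induction cs with
  | nil => intro wys acc acc' wys' h; exact absurd rfl h
  | cons c cs ih =>
    intro wys acc acc' wys' _ heq
    simp only [innerA] at heq
    split at heq
    · exact absurd heq (by simp)
    · rename_i hlt
      rcases cs with _ | ⟨c2, cs2⟩
      · simp only [innerA, Prod.mk.injEq] at heq
        omega
      · have := ih (wys + 1) _ acc' wys' (by simp) heq
        omega

-- A's 'for zna in list2' over the growing list2: pending = elements not yet iterated
def outerA (chars : List Char) (hne : chars ≠ []) (dl : Int) :
    List String → Int → List String → List String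
  | [], _, acc => acc
  | zna :: pend, wys, acc =>
    let r := innerA dl zna chars wys acc
    if r.2.2 then r.1
    else outerA chars hne dl (pend ++ r.1.drop acc.length) r.2.1 r.1
  termination_by pend wys acc => (dl - wys).toNat
  decreasing_by
    rename_i hb
    have heq : innerA dl zna chars wys acc = (r.1, r.2.1, false) := by
      have : r.2.2 = false := by revert hb; cases r.2.2 <;> simp
      rw [← this]
    have hr : r = innerA dl zna chars wys acc := rfl
    have := innerA_false_bounds dl zna chars wys acc r.1 r.2.1 hne heq
    rw [hr] at this
    omega

def ciongznakow (ciong : String) (dlugosc : Int) : List String :=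
  let chars := ciong.toList
  let init := chars.map strOfChar
  if h : chars = [] then init  -- Python A returns None here (loop never runs); outside Pre_
  else outerA chars h dlugosc init (init.length : Int) init

-- ===== PORT B =====
-- itertools.product(elements, repeat=length), each tuple joined left-associatively by reduce(add)
def tuplesB (elems : List String) : Nat → List String
  | 0 => [""]
  | n + 1 => (tuplesB elems n).flatMap (fun w => elems.map (fun e => w ++ e))

-- 'for combo in product: result.append(...); if len(result) >= dlugosc: return result'
def layerLoopB (dl : Int) : List String → List String → (List String × Bool)
  | [], res => (res, false)
  | s :: rest, res =>
    let res' := res ++ [s]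
    if (res'.length : Int) ≥ dl then (res', true)
    else layerLoopB dl rest res'

-- termination facts for outerB, cited in its decreasing_by
theorem layerLoopB_false_bounds (dl : Int) :
    ∀ (xs res res' : List String), xs ≠ [] → layerLoopB dl xs res = (res', false) →
      res.length < res'.length ∧ (res'.length : Int) < dl := by
  intro xs
  induction xs with
  | nil => intro res res' h; exact absurd rfl h
  | cons s rest ih =>
    intro res res' _ heq
    simp only [layerLoopB] at heq
    split at heq
    · exact absurd heq (by simp)
    · rename_i hlt
      rcases rest with _ | ⟨s2, rest2⟩
      · simp only [layerLoopB, Prod.mk.injEq] at heq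
        obtain ⟨h1, -⟩ := heq
        subst h1
        constructor
        · simp
        · simp only [List.length_append, List.length_cons, List.length_nil] at hlt ⊢
          omega
      · have := ih _ res' (by simp) heq
        simp at this ⊢
        omega

theorem tuplesB_ne_nil (elems : List String) (h : elems ≠ []) : ∀ n, tuplesB elems n ≠ [] := by
  intro n
  induction n with
  | zero => simp [tuplesB]
  | succ n ih =>
    simp only [tuplesB, ne_eq, List.flatMap_eq_nil_iff]
    intro hall
    rcases List.exists_mem_of_ne_nil _ ih with ⟨w, hw⟩
    have := hall w hw
    simp [List.map_eq_nil_iff] at this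
    exact h this

-- the 'while True' loop over growing length
def outerB (elems : List String) (hne : elems ≠ []) (dl : Int) :
    Nat → List String → List String
  | length, res =>
    let r := layerLoopB dl (tuplesB elems length) res
    if r.2 then r.1 else outerB elems hne dl (length + 1) r.1
  termination_by length res => (dl - res.length).toNat
  decreasing_by
    rename_i hb
    have heq : layerLoopB dl (tuplesB elems length) res = (r.1, false) := by
      have : r.2 = false := by revert hb; cases r.2 <;> simp
      rw [← this]
    have := layerLoopB_false_bounds dl (tuplesB elems length) res r.1
      (tuplesB_ne_nil elems hne length) heq
    have hr : r = layerLoopB dl (tuplesB elems length) res := rfl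
    rw [hr] at this
    omega

def ciongznakow_alt (ciong : String) (dlugosc : Int) : List String :=
  let elems := ciong.toList.map strOfChar
  if h : elems = [] then elems
  else outerB elems h dlugosc 2 elems

-- ===== PRECONDITION & SPEC =====
-- Pre_ excludes the empty string, on which Python A's loops never run and it returns None
-- (not a list), while B returns the empty list.
def Pre_ciongznakow (ciong : String) (dlugosc : Int) : Prop := ciong ≠ ""
instance (ciong : String) (dlugosc : Int) : Decidable (Pre_ciongznakow ciong dlugosc) := by
  unfold Pre_ciongznakow; infer_instance

def pvWitness_ciongznakow : String × Int := ("ab", 7)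

def Spec_ciongznakow (ciong : String) (dlugosc : Int) (out : List String) : Prop := out = ciongznakow_alt ciong dlugosc
instance (ciong : String) (dlugosc : Int) (out : List String) : Decidable (Spec_ciongznakow ciong dlugosc out) := by unfold Spec_ciongznakow; infer_instance

-- ===== CLAIM (what is proved, stated in full; the proofs are below) =====
def Claim_equal_ciongznakow : Prop := ∀ (ciong : String) (dlugosc : Int), Dom_ciongznakow ciong dlugosc → Pre_ciongznakow ciong dlugosc → Spec_ciongznakow ciong dlugosc (ciongznakow ciong dlugosc)

-- ===== LEMMAS AND PROOFS =====

-- The common stream: S 0, S 1, … is the sequence of strings both programs emit, in order.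
def streamS (chars : List Char) (hm : chars ≠ []) (i : Nat) : String :=
  if h : i < chars.length then strOfChar (chars.getD i ' ')
  else streamS chars hm ((i - chars.length) / chars.length) ++
       strOfChar (chars.getD ((i - chars.length) % chars.length) ' ')
  termination_by i
  decreasing_by
    have h1 : 0 < chars.length := List.length_pos_iff.mpr hm
    have h2 : (i - chars.length) / chars.length ≤ i - chars.length := Nat.div_le_self _ _
    omega

-- final length of both results
def pvL (m : Nat) (dl : Int) : Nat := max (m + 1) dl.toNat

theorem streamS_base (chars : List Char) (hm : chars ≠ []) (i : Nat) (h : i < chars.length) :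
    streamS chars hm i = strOfChar (chars.getD i ' ') := by
  rw [streamS]; simp [h]

theorem streamS_child (chars : List Char) (hm : chars ≠ []) (p j : Nat) (hj : j < chars.length) :
    streamS chars hm (chars.length * (p + 1) + j) =
      streamS chars hm p ++ strOfChar (chars.getD j ' ') := by
  have hm0 : 0 < chars.length := List.length_pos_iff.mpr hm
  have h1 : chars.length * (p + 1) = chars.length * p + chars.length := by ring
  have h2 : chars.length * (p + 1) + j - chars.length = chars.length * p + j := by omega
  have hdiv : (chars.length * (p + 1) + j - chars.length) / chars.length = p := by
    rw [h2, Nat.mul_add_div hm0, Nat.div_eq_of_lt hj]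
    omega
  have hmod : (chars.length * (p + 1) + j - chars.length) % chars.length = j := by
    rw [h2, Nat.mul_add_mod, Nat.mod_eq_of_lt hj]
  rw [streamS, dif_neg (by omega), hdiv, hmod]

theorem map_child (chars : List Char) (hm : chars ≠ []) (p : Nat) :
    chars.map (fun c => streamS chars hm p ++ strOfChar c) =
      (List.range' (chars.length * (p + 1)) chars.length).map (streamS chars hm) := by
  apply List.ext_getElem
  · simp
  · intro i h1 h2
    simp only [List.getElem_map, List.getElem_range'_1]
    have hi : i < chars.length := by simpa using h1
    rw [streamS_child chars hm p i hi, List.getD_eq_getElem chars ' ' hi]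

theorem base_map (chars : List Char) (hm : chars ≠ []) :
    chars.map strOfChar = (List.range' 0 chars.length).map (streamS chars hm) := by
  apply List.ext_getElem
  · simp
  · intro i h1 h2
    have hi : i < chars.length := by simpa using h1
    simp only [List.getElem_map, List.getElem_range'_1, Nat.zero_add]
    rw [streamS_base chars hm i hi, List.getD_eq_getElem chars ' ' hi]

theorem take_range'_map (chars : List Char) (hm : chars ≠ []) (n k t : Nat) :
    (((List.range' n k).map (streamS chars hm)).take t) =
      (List.range' n (min t k)).map (streamS chars hm) := by
  apply List.ext_getElem
  · simp
  · intro i h1 h2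
    simp [List.getElem_take, List.getElem_map]

-- characterisation of the append-and-check runner
theorem layerLoopB_run (dl : Int) : ∀ (xs res : List String),
    layerLoopB dl xs res =
      if ((res.length + xs.length : Nat) : Int) < dl then (res ++ xs, false)
      else if xs = [] then (res, false)
      else (res ++ xs.take (max 1 (dl.toNat - res.length)), true) := by
  intro xs
  induction xs with
  | nil =>
    intro res
    simp only [layerLoopB, List.length_nil, List.append_nil]
    split_ifs <;> simp_all
  | cons s rest ih =>
    intro res
    simp only [layerLoopB, List.length_cons]
    by_cases htrig : ((res ++ [s]).length : Int) ≥ dl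
    · have hc : (↑(res.length + (rest.length + 1)) : Int) < dl → False := by
        simp at htrig; push_cast; omega
      have ht : max 1 (dl.toNat - res.length) = 1 := by
        simp at htrig; omega
      rw [if_pos htrig, if_neg hc, if_neg (by simp), ht]
      simp
    · rw [if_neg htrig, ih]
      simp only [List.length_append, List.length_cons, List.length_nil] at htrig ⊢
      by_cases hs : ((res.length + (rest.length + 1) : Nat) : Int) < dl
      · rw [if_pos (by push_cast; push_cast at hs; omega), if_pos (by push_cast at hs ⊢; omega)]
        simp
      · have hrest : rest ≠ [] := by
          intro h0; subst h0; simp at hs; omega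
        rw [if_neg (by push_cast; push_cast at hs; omega), if_neg hrest,
            if_neg (by push_cast at hs ⊢; omega), if_neg (by simp)]
        have hd : dl.toNat ≥ res.length + 2 := by simp at htrig; omega
        have ht1 : max 1 (dl.toNat - (res.length + 1)) = dl.toNat - res.length - 1 := by omega
        have ht2 : max 1 (dl.toNat - res.length) = (dl.toNat - res.length - 1) + 1 := by omega
        rw [ht1, ht2, List.take_succ_cons]
        simp

-- A's inner loop is the runner applied to the children of zna
theorem innerA_eq_run (dl : Int) (zna : String) : ∀ (cs : List Char) (acc : List String),
    innerA dl zna cs (acc.length : Int) acc =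
      (let r := layerLoopB dl (cs.map (fun c => zna ++ strOfChar c)) acc
       (r.1, (r.1.length : Int), r.2)) := by
  intro cs
  induction cs with
  | nil => intro acc; simp [innerA, layerLoopB]
  | cons c cs ih =>
    intro acc
    simp only [innerA, layerLoopB, List.map_cons]
    by_cases h : (acc.length : Int) + 1 ≥ dl
    · rw [if_pos h, if_pos (by simp; omega)]
      simp
    · rw [if_neg h, if_neg (by simp; omega)]
      have hlen : (acc.length : Int) + 1 = ((acc ++ [zna ++ strOfChar c]).length : Int) := by
        simp
      rw [hlen, ih]

theorem finish_len (m n k t L dltn : Nat) (hm : 1 ≤ m) (hk : 1 ≤ k) (hnm : m ≤ n)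
    (hnL : n < L) (hL : L = max (m + 1) dltn) (htrig : dltn ≤ n + k)
    (ht : t = max 1 (dltn - n)) : n + min t k = L := by omega

theorem catm (chars : List Char) (hne : chars ≠ []) (s k1 t k2 r : Nat)
    (h1 : t = s + k1) (h2 : r = k1 + k2) :
    (List.range' s k1).map (streamS chars hne) ++ (List.range' t k2).map (streamS chars hne) =
      (List.range' s r).map (streamS chars hne) := by
  subst h1 h2
  rw [← List.map_append, List.range'_append_1]

theorem outerA_run (chars : List Char) (hne : chars ≠ []) (dl : Int) :
    ∀ (K p : Nat), chars.length * (p + 1) < pvL chars.length dl →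
      pvL chars.length dl - chars.length * (p + 1) ≤ K →
      outerA chars hne dl
        ((List.range' p (chars.length * (p + 1) - p)).map (streamS chars hne))
        ((chars.length * (p + 1) : Nat) : Int)
        ((List.range' 0 (chars.length * (p + 1))).map (streamS chars hne)) =
      (List.range' 0 (pvL chars.length dl)).map (streamS chars hne) := by
  intro K
  induction K with
  | zero => intro p h1 h2; omega
  | succ K ih =>
    intro p hnL hK
    have hm0 : 0 < chars.length := List.length_pos_iff.mpr hne
    have hple : p + 1 ≤ chars.length * (p + 1) := Nat.le_mul_of_pos_left _ hm0
    have hmul : chars.length * (p + 2) = chars.length * (p + 1) + chars.length := by ring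
    have hnm : chars.length ≤ chars.length * (p + 1) := Nat.le_mul_of_pos_right _ (by omega)
    have hpend : chars.length * (p + 1) - p = (chars.length * (p + 1) - p - 1) + 1 := by omega
    rw [hpend, List.range'_succ, List.map_cons]
    have hinner := innerA_eq_run dl (streamS chars hne p) chars
      ((List.range' 0 (chars.length * (p + 1))).map (streamS chars hne))
    rw [map_child chars hne p] at hinner
    simp only [List.length_map, List.length_range'] at hinner
    rw [layerLoopB_run] at hinner
    simp only [List.length_map, List.length_range'] at hinner
    by_cases htr : ((chars.length * (p + 1) + chars.length : Nat) : Int) < dl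
    · rw [if_pos htr] at hinner
      simp only [outerA, hinner]
      have hdrop : ((List.range' 0 (chars.length * (p + 1))).map (streamS chars hne) ++
          (List.range' (chars.length * (p + 1)) chars.length).map (streamS chars hne)).drop
            ((List.range' 0 (chars.length * (p + 1))).map (streamS chars hne)).length =
          (List.range' (chars.length * (p + 1)) chars.length).map (streamS chars hne) := by
        simp
      rw [hdrop,
        catm chars hne (p + 1) (chars.length * (p + 1) - p - 1) (chars.length * (p + 1))
          chars.length (chars.length * (p + 2) - (p + 1)) (by omega) (by omega),
        catm chars hne 0 (chars.length * (p + 1)) (chars.length * (p + 1))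
          chars.length (chars.length * (p + 2)) (by omega) (by omega)]
      have hlen : (((List.range' 0 (chars.length * (p + 2))).map (streamS chars hne)).length : Int) =
          ((chars.length * (p + 2) : Nat) : Int) := by
        simp
      rw [hlen]
      have htrN : chars.length * (p + 1) + chars.length < dl.toNat := by omega
      have hmul2 : chars.length * (p + 1 + 1) = chars.length * (p + 1) + chars.length := by ring
      exact ih (p + 1) (by unfold pvL at *; omega) (by unfold pvL at *; omega)
    · rw [if_neg htr, if_neg (by simp; omega)] at hinner
      simp only [outerA, hinner]
      have hfin : chars.length * (p + 1) +
          min (max 1 (dl.toNat - chars.length * (p + 1))) chars.length = pvL chars.length dl :=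
        finish_len chars.length (chars.length * (p + 1)) chars.length _ (pvL chars.length dl)
          dl.toNat (by omega) (by omega) hnm hnL rfl (by omega) rfl
      rw [take_range'_map,
        catm chars hne 0 (chars.length * (p + 1)) (chars.length * (p + 1))
          (min (max 1 (dl.toNat - chars.length * (p + 1))) chars.length)
          (pvL chars.length dl) (by omega) (by omega)]
      simp

theorem flat_child (chars : List Char) (hne : chars ≠ []) : ∀ (len a : Nat),
    (((List.range' a len).map (streamS chars hne)).flatMap
        (fun w => (chars.map strOfChar).map (fun e => w ++ e))) =
      (List.range' (chars.length + a * chars.length) (len * chars.length)).map (streamS chars hne) := by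
  intro len
  induction len with
  | zero => intro a; simp
  | succ len ih =>
    intro a
    rw [List.range'_succ, List.map_cons, List.flatMap_cons]
    have h1 : (chars.map strOfChar).map (fun e => streamS chars hne a ++ e) =
        chars.map (fun c => streamS chars hne a ++ strOfChar c) := by
      rw [List.map_map]; rfl
    rw [h1, map_child chars hne a, ih (a + 1)]
    have h2 : chars.length + (a + 1) * chars.length = chars.length * (a + 1) + chars.length := by
      ring
    rw [h2, ← List.map_append, List.range'_append_1]
    have h3 : chars.length + a * chars.length = chars.length * (a + 1) := by ring
    have h4 : (len + 1) * chars.length = chars.length + len * chars.length := by ring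
    rw [h3, h4]

theorem outerB_run (chars : List Char) (hne : chars ≠ []) (hne' : chars.map strOfChar ≠ [])
    (dl : Int) :
    ∀ (K l n : Nat), 1 ≤ l → chars.length ≤ n → n < pvL chars.length dl →
      pvL chars.length dl - n ≤ K →
      chars.length + n * chars.length = n + chars.length ^ l →
      tuplesB (chars.map strOfChar) l = (List.range' n (chars.length ^ l)).map (streamS chars hne) →
      outerB (chars.map strOfChar) hne' dl l ((List.range' 0 n).map (streamS chars hne)) =
      (List.range' 0 (pvL chars.length dl)).map (streamS chars hne) := by
  intro K
  induction K with
  | zero => intro l n _ _ h3 h4 _ _; omega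
  | succ K ih =>
    intro l n hl hmn hnL hK hgeo htup
    have hm0 : 0 < chars.length := List.length_pos_iff.mpr hne
    have hpow : 0 < chars.length ^ l := pow_pos hm0 l
    have hinner := layerLoopB_run dl (tuplesB (chars.map strOfChar) l)
      ((List.range' 0 n).map (streamS chars hne))
    rw [htup] at hinner
    simp only [List.length_map, List.length_range'] at hinner
    by_cases htr : ((n + chars.length ^ l : Nat) : Int) < dl
    · rw [if_pos htr] at hinner
      rw [outerB, htup]
      simp only [hinner]
      rw [catm chars hne 0 n n (chars.length ^ l) (n + chars.length ^ l) (by omega) rfl]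
      simp only [Bool.false_eq_true, if_false]
      have htrN : n + chars.length ^ l < dl.toNat := by omega
      have hg2 : chars.length + (n + chars.length ^ l) * chars.length =
          (n + chars.length ^ l) + chars.length ^ (l + 1) := by
        have e1 : (n + chars.length ^ l) * chars.length =
            n * chars.length + chars.length ^ l * chars.length := by ring
        have e2 : chars.length ^ (l + 1) = chars.length ^ l * chars.length := by ring
        omega
      have htup2 : tuplesB (chars.map strOfChar) (l + 1) =
          (List.range' (n + chars.length ^ l) (chars.length ^ (l + 1))).map (streamS chars hne) := by
        simp only [tuplesB]
        rw [htup, flat_child chars hne (chars.length ^ l) n, hgeo,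
          show chars.length ^ l * chars.length = chars.length ^ (l + 1) from (pow_succ _ _).symm]
      have hL : pvL chars.length dl = max (chars.length + 1) dl.toNat := rfl
      have h3 : n + chars.length ^ l < pvL chars.length dl := by rw [hL]; omega
      have h4 : pvL chars.length dl - (n + chars.length ^ l) ≤ K := by omega
      exact ih (l + 1) (n + chars.length ^ l) (by omega)
        (le_trans hmn (Nat.le_add_right _ _)) h3 h4 hg2 htup2
    · rw [if_neg htr, if_neg (by
        intro h0
        have hlen0 := congrArg List.length h0
        simp only [List.length_map, List.length_range', List.length_nil] at hlen0
        omega)] at hinner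
      rw [outerB, htup]
      simp only [hinner]
      have hfin : n + min (max 1 (dl.toNat - n)) (chars.length ^ l) = pvL chars.length dl :=
        finish_len chars.length n (chars.length ^ l) _ (pvL chars.length dl)
          dl.toNat (by omega) (by omega) hmn hnL rfl (by omega) rfl
      rw [take_range'_map,
        catm chars hne 0 n n (min (max 1 (dl.toNat - n)) (chars.length ^ l))
          (pvL chars.length dl) (by omega) (by omega)]
      simp

theorem A_closed (ciong : String) (dl : Int) (h : ciong.toList ≠ []) :
    ciongznakow ciong dl =
      (List.range' 0 (pvL ciong.toList.length dl)).map (streamS ciong.toList h) := by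
  simp only [ciongznakow]
  rw [dif_neg h, base_map ciong.toList h]
  have h1 := outerA_run ciong.toList h dl (pvL ciong.toList.length dl) 0
    (by unfold pvL; simp) (Nat.sub_le _ _)
  simp only [Nat.zero_add, Nat.mul_one, Nat.sub_zero] at h1
  simp only [List.length_map, List.length_range']
  exact h1

theorem B_closed (ciong : String) (dl : Int) (h : ciong.toList ≠ []) :
    ciongznakow_alt ciong dl =
      (List.range' 0 (pvL ciong.toList.length dl)).map (streamS ciong.toList h) := by
  have hmap : ciong.toList.map strOfChar ≠ [] := by
    simpa [List.map_eq_nil_iff] using h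
  simp only [ciongznakow_alt]
  rw [dif_neg hmap]
  have hm0 : 0 < ciong.toList.length := List.length_pos_iff.mpr h
  have htup1 : tuplesB (ciong.toList.map strOfChar) 1 = ciong.toList.map strOfChar := by
    simp [tuplesB]
  have htup2 : tuplesB (ciong.toList.map strOfChar) 2 =
      (List.range' ciong.toList.length (ciong.toList.length ^ 2)).map (streamS ciong.toList h) := by
    have hstep : tuplesB (ciong.toList.map strOfChar) 2 =
        (tuplesB (ciong.toList.map strOfChar) 1).flatMap
          (fun w => (ciong.toList.map strOfChar).map (fun e => w ++ e)) := rfl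
    have hfc := flat_child ciong.toList h ciong.toList.length 0
    rw [← base_map ciong.toList h] at hfc
    rw [hstep, htup1, hfc,
      show ciong.toList.length + 0 * ciong.toList.length = ciong.toList.length from by ring,
      show ciong.toList.length * ciong.toList.length = ciong.toList.length ^ 2 from by ring]
  have hgeo : ciong.toList.length + ciong.toList.length * ciong.toList.length =
      ciong.toList.length + ciong.toList.length ^ 2 := by ring
  have hres := outerB_run ciong.toList h hmap dl (pvL ciong.toList.length dl) 2
    ciong.toList.length (by omega) (le_refl _) (by unfold pvL; omega) (Nat.sub_le _ _)
    hgeo htup2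
  rw [← base_map ciong.toList h] at hres
  exact hres

-- ===== VERDICT (by name: the statement is the Claim_ definition above) =====
theorem ciongznakow_spec : Claim_equal_ciongznakow := by
  intro ciong dlugosc _ hpre
  unfold Spec_ciongznakow
  have h : ciong.toList ≠ [] := by
    intro hnil
    exact hpre (String.toList_eq_nil_iff.mp hnil)
  rw [A_closed ciong dlugosc h, B_closed ciong dlugosc h]
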